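-- pv_equiv track=rewrite | github.com/KarnaushenkoVO/MiranaAndArrows | mirana_and_arrows.py | solve_mirana_challenge
-- ===== SOURCE A (Python) =====
-- def solve_mirana_challenge(maximum_cumulative_distance, distances):
--     """
--        Main function, which incorporates the logic of finding maximum number of arrows for mirana.
--
--        :param int maximum_cumulative_distance: Max distance for Mirana until perish. Example: 3
--        :param list[int, ...] distances: Max distance for each arrow. Example: [1, 2, 3]
--        :return: max number of arrows for Mirana within max cumulative distance constraint. Example: 2
--        :rtype: int
--     """
--
--     max_number_of_arrows = 0
--
--     for pivot_distance_id in range(len(distances)):  # Let's try to use every arrow as a starting point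
--         _local_sum = 0
--         _current_number_of_arrows = 0
--
--         # Sum all distances from starting arrow util it exceeds maximum_cumulative_distance
--         for distance_to_sum in distances[pivot_distance_id:]:
--             _new_local_sum = _local_sum + abs(distance_to_sum)  # Consider only positive distances
--             if _new_local_sum <= maximum_cumulative_distance:
--                 _local_sum = _new_local_sum
--                 _current_number_of_arrows += 1
--             else:
--                 break
--
--         # If on some iteration we used more arrows than before, let's save it as a max number
--         if _current_number_of_arrows > max_number_of_arrows:
--             max_number_of_arrows = _current_number_of_arrows
--
--     return max_number_of_arrows
-- ===== SOURCE B (Python) =====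
-- def solve_mirana_challenge(maximum_cumulative_distance, distances):
--     best = 0
--     window_sum = 0
--     left = 0
--     for right, d in enumerate(distances):
--         window_sum += abs(d)
--         while window_sum > maximum_cumulative_distance and left <= right:
--             window_sum -= abs(distances[left])
--             left += 1
--         if right - left + 1 > best:
--             best = right - left + 1
--     return best
-- ===== Notes on version B (the rewrite author's own statement) =====
-- stated objective: faster
-- what changed: Replaced the quadratic restart-at-every-pivot scan by a single two-pointer sliding window over the absolute distances that tracks the maximal window length.
import Mathlib
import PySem

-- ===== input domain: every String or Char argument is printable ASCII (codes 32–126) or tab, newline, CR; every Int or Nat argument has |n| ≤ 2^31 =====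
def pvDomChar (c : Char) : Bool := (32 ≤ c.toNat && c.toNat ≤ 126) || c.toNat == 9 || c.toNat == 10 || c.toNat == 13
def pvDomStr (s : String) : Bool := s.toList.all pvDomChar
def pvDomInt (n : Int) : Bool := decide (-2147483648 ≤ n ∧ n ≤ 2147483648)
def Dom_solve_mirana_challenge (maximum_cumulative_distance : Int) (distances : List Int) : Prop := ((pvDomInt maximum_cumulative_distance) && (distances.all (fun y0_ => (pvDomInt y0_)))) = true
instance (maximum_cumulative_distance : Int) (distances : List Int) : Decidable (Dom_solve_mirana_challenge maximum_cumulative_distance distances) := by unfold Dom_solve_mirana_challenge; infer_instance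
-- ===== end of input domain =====

-- B replaces A's quadratic restart-at-every-pivot scan by a one-pass two-pointer
-- sliding window over the absolute distances (same return value, asymptotically faster).

-- ===== PORT A =====
-- inner 'for distance_to_sum in distances[pivot:]' loop with its break,
-- carrying _local_sum (s) and _current_number_of_arrows (c)
def runA (M : Int) (s c : Int) : List Int → Int
  | [] => c
  | d :: t =>
      let ns := s + |d|
      if ns ≤ M then runA M ns (c + 1) t else c

-- distances[i:] for a natural i is exactly List.drop i
def solve_mirana_challenge (maximum_cumulative_distance : Int) (distances : List Int) : Int :=
  (List.range distances.length).foldl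
    (fun m i =>
      let c := runA maximum_cumulative_distance 0 0 (distances.drop i)
      if c > m then c else m) 0

-- ===== PORT B =====
-- the 'while window_sum > M and left <= right' loop; left is a Nat because in B it
-- starts at 0 and is only incremented, and the guard left ≤ right < len(distances)
-- keeps distances[left] in range, so getD is exact
def shrinkB (M : Int) (ds : List Int) (right : Nat) (left : Nat) (s : Int) : Nat × Int :=
  if s > M ∧ left ≤ right then
    shrinkB M ds right (left + 1) (s - |ds.getD left 0|)
  else (left, s)
termination_by right + 1 - left
decreasing_by omega

-- 'for right, d in enumerate(distances)', carried as structural recursion with the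
-- running index right; state = (left, window_sum, best)
def loopB (M : Int) (ds : List Int) : Nat → Nat → Int → Int → List Int → Int
  | _, _, _, best, [] => best
  | right, left, s, best, d :: t =>
      let ws := s + |d|
      let p := shrinkB M ds right left ws
      let cand := (right : Int) - p.1 + 1
      loopB M ds (right + 1) p.1 p.2 (if cand > best then cand else best) t

def solve_mirana_challenge_alt (maximum_cumulative_distance : Int) (distances : List Int) : Int :=
  loopB maximum_cumulative_distance distances 0 0 0 0 distances

-- ===== PRECONDITION & SPEC =====
def Spec_solve_mirana_challenge (maximum_cumulative_distance : Int) (distances : List Int) (out : Int) : Prop := out = solve_mirana_challenge_alt maximum_cumulative_distance distances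
instance (maximum_cumulative_distance : Int) (distances : List Int) (out : Int) : Decidable (Spec_solve_mirana_challenge maximum_cumulative_distance distances out) := by unfold Spec_solve_mirana_challenge; infer_instance

-- ===== CLAIM (what is proved, stated in full; the proofs are below) =====
def Claim_equal_solve_mirana_challenge : Prop := ∀ (maximum_cumulative_distance : Int) (distances : List Int), Dom_solve_mirana_challenge maximum_cumulative_distance distances → Spec_solve_mirana_challenge maximum_cumulative_distance distances (solve_mirana_challenge maximum_cumulative_distance distances)

-- ===== LEMMAS AND PROOFS =====

-- prefix sums of absolute values
def P (ds : List Int) (k : Nat) : Int := ((ds.take k).map (fun d => |d|)).sum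

lemma P_zero (ds : List Int) : P ds 0 = 0 := rfl

lemma P_succ (ds : List Int) (k : Nat) (hk : k < ds.length) :
    P ds (k + 1) = P ds k + |ds.getD k 0| := by
  unfold P
  rw [List.map_take, List.map_take, List.sum_take_succ _ k (by simpa using hk)]
  simp [List.getD_eq_getElem?_getD, List.getElem?_eq_getElem hk]

lemma P_mono (ds : List Int) {i j : Nat} (h : i ≤ j) : P ds i ≤ P ds j := by
  induction j with
  | zero =>
    have : i = 0 := by omega
    subst this; exact le_refl _
  | succ j ih =>
    have step : P ds j ≤ P ds (j + 1) := by
      rcases Nat.lt_or_ge j ds.length with hj | hj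
      · rw [P_succ ds j hj]
        have := abs_nonneg (ds.getD j 0)
        omega
      · unfold P
        rw [List.take_of_length_le hj, List.take_of_length_le (by omega)]
    rcases Nat.eq_or_lt_of_le h with rfl | h'
    · exact le_refl _
    · exact le_trans (ih (by omega)) step

-- greedy longest-prefix count, Nat-valued
def gN (M : Int) : List Int → Nat
  | [] => 0
  | d :: t => if |d| ≤ M then gN (M - |d|) t + 1 else 0

lemma runA_eq (M : Int) (t : List Int) : ∀ s c, runA M s c t = c + (gN (M - s) t : Int) := by
  induction t with
  | nil => intro s c; simp [runA, gN]
  | cons d t ih =>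
    intro s c
    simp only [runA, gN]
    by_cases h : s + |d| ≤ M
    · rw [if_pos h, if_pos (by omega), ih]
      have e : M - (s + |d|) = M - s - |d| := by ring
      rw [e]; push_cast; ring
    · rw [if_neg h, if_neg (by omega)]
      simp

lemma gN_le_len (M : Int) (t : List Int) : gN M t ≤ t.length := by
  induction t generalizing M with
  | nil => simp [gN]
  | cons d t ih => simp only [gN]; split <;> simp [Nat.succ_le_succ (ih _)]

lemma gN_sum (M : Int) (t : List Int) (h : 0 < gN M t) :
    ((t.take (gN M t)).map (fun d => |d|)).sum ≤ M := by
  induction t generalizing M with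
  | nil => simp [gN] at h
  | cons d t ih =>
    simp only [gN] at h ⊢
    split at h
    · rename_i hd
      rw [if_pos hd]
      simp only [List.take_succ_cons, List.map_cons, List.sum_cons]
      by_cases h0 : 0 < gN (M - |d|) t
      · have := ih (M - |d|) h0; omega
      · have : gN (M - |d|) t = 0 := by omega
        simp [this]; omega
    · omega

lemma sum_abs_nonneg (t : List Int) : 0 ≤ (t.map (fun d => |d|)).sum := by
  induction t with
  | nil => simp
  | cons d t ih => simp only [List.map_cons, List.sum_cons]; positivity

lemma gN_max (M : Int) (t : List Int) : ∀ k, k ≤ t.length →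
    ((t.take k).map (fun d => |d|)).sum ≤ M → k ≤ gN M t := by
  induction t generalizing M with
  | nil =>
    intro k hk _
    simp only [List.length_nil, Nat.le_zero] at hk
    subst hk
    exact Nat.zero_le _
  | cons d t ih =>
    intro k hk hs
    cases k with
    | zero => omega
    | succ k =>
      simp only [List.take_succ_cons, List.map_cons, List.sum_cons] at hs
      have hrest : 0 ≤ ((t.take k).map (fun d => |d|)).sum := sum_abs_nonneg _
      have hd : |d| ≤ M := by omega
      simp only [gN, if_pos hd]
      have := ih (M - |d|) k (by simpa using hk) (by omega)
      omega

-- window sum via prefix sums: sum of |·| over ds[i:j) = P j - P i  (i ≤ j)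
lemma window_sum (ds : List Int) (i k : Nat) :
    (((ds.drop i).take k).map (fun d => |d|)).sum = P ds (i + k) - P ds i := by
  unfold P
  rw [List.take_add, List.map_append, List.sum_append]
  omega

-- A characterized --------------------------------------------------------

def IsAns (M : Int) (ds : List Int) (v : Int) : Prop :=
  0 ≤ v ∧
  (v = 0 ∨ ∃ i j : Nat, i ≤ j ∧ j ≤ ds.length ∧ P ds j - P ds i ≤ M ∧ v = (j : Int) - i) ∧
  (∀ i j : Nat, i ≤ j → j ≤ ds.length → P ds j - P ds i ≤ M → (j : Int) - i ≤ v)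

lemma isAns_unique (M : Int) (ds : List Int) (v w : Int)
    (hv : IsAns M ds v) (hw : IsAns M ds w) : v = w := by
  obtain ⟨hv0, hva, hvu⟩ := hv
  obtain ⟨hw0, hwa, hwu⟩ := hw
  have h1 : v ≤ w := by
    rcases hva with heq | ⟨i, j, hij, hjn, hsum, heq⟩
    · rw [heq]; exact hw0
    · rw [heq]; exact hwu i j hij hjn hsum
  have h2 : w ≤ v := by
    rcases hwa with heq | ⟨i, j, hij, hjn, hsum, heq⟩
    · rw [heq]; exact hv0
    · rw [heq]; exact hvu i j hij hjn hsum
  omega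

-- the value of A's inner run starting at pivot i
lemma runA_drop (M : Int) (ds : List Int) (i : Nat) :
    runA M 0 0 (ds.drop i) = (gN M (ds.drop i) : Int) := by
  rw [runA_eq]; simp

-- fold-max helpers (generic; instantiated with f i = A's inner run at pivot i)
lemma foldMax_ge_init (f : Nat → Int) (l : List Nat) : ∀ init : Int,
    init ≤ l.foldl (fun m i => if f i > m then f i else m) init := by
  induction l with
  | nil => intro init; simp
  | cons y l ih =>
    intro init
    simp only [List.foldl_cons]
    refine le_trans ?_ (ih _)
    split <;> omega

lemma foldMax_ge (f : Nat → Int) (l : List Nat) : ∀ init : Int, ∀ x ∈ l,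
    f x ≤ l.foldl (fun m i => if f i > m then f i else m) init := by
  induction l with
  | nil => intro _ x hx; simp at hx
  | cons y l ih =>
    intro init x hx
    rcases List.mem_cons.mp hx with rfl | hx
    · simp only [List.foldl_cons]
      refine le_trans ?_ (foldMax_ge_init f l _)
      split <;> omega
    · exact ih _ x hx

lemma foldMax_ach (f : Nat → Int) (l : List Nat) : ∀ init : Int,
    (l.foldl (fun m i => if f i > m then f i else m) init = init) ∨
    (∃ x ∈ l, l.foldl (fun m i => if f i > m then f i else m) init = f x) := by
  induction l with
  | nil => intro init; left; rfl
  | cons y l ih =>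
    intro init
    simp only [List.foldl_cons]
    rcases ih (if f y > init then f y else init) with h | ⟨x, hx, h⟩
    · rw [h]
      split
      · right; exact ⟨y, List.mem_cons_self, rfl⟩
      · left; rfl
    · right; exact ⟨x, List.mem_cons_of_mem _ hx, h⟩

-- the specialized wrappers are accepted by defeq (beta/zeta) against the port
lemma A_ge_init (M : Int) (ds : List Int) : 0 ≤ solve_mirana_challenge M ds :=
  foldMax_ge_init (fun i => runA M 0 0 (ds.drop i)) (List.range ds.length) 0

lemma A_ge (M : Int) (ds : List Int) (x : Nat) (hx : x ∈ List.range ds.length) :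
    runA M 0 0 (ds.drop x) ≤ solve_mirana_challenge M ds :=
  foldMax_ge (fun i => runA M 0 0 (ds.drop i)) (List.range ds.length) 0 x hx

lemma A_ach (M : Int) (ds : List Int) :
    solve_mirana_challenge M ds = 0 ∨
    ∃ x ∈ List.range ds.length, solve_mirana_challenge M ds = runA M 0 0 (ds.drop x) :=
  foldMax_ach (fun i => runA M 0 0 (ds.drop i)) (List.range ds.length) 0

lemma A_isAns (M : Int) (ds : List Int) : IsAns M ds (solve_mirana_challenge M ds) := by
  refine ⟨A_ge_init M ds, ?_, ?_⟩
  · rcases A_ach M ds with h | ⟨x, hx, h⟩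
    · left; exact h
    · rw [runA_drop] at h
      by_cases h0 : 0 < gN M (ds.drop x)
      · right
        have hxlen : x < ds.length := List.mem_range.mp hx
        refine ⟨x, x + gN M (ds.drop x), by omega, ?_, ?_, by rw [h]; push_cast; ring⟩
        · have := gN_le_len M (ds.drop x)
          rw [List.length_drop] at this; omega
        · have := gN_sum M (ds.drop x) h0
          rwa [window_sum] at this
      · left; rw [h]; omega
  · intro i j hij hj hs
    rcases Nat.eq_or_lt_of_le hij with rfl | hlt
    · have := A_ge_init M ds
      omega
    · have hi : i < ds.length := by omega
      have hge := A_ge M ds i (List.mem_range.mpr hi)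
      rw [runA_drop] at hge
      have hk : j - i ≤ gN M (ds.drop i) := by
        apply gN_max
        · rw [List.length_drop]; omega
        · rw [window_sum]
          have e : i + (j - i) = j := by omega
          rw [e]; exact hs
      have : ((j - i : Nat) : Int) ≤ (gN M (ds.drop i) : Int) := by exact_mod_cast hk
      push_cast at this
      omega

-- B's invariant ----------------------------------------------------------

lemma shrinkB_spec (M : Int) (ds : List Int) (right : Nat) (hr : right < ds.length) :
    ∀ left s, left ≤ right + 1 → s = P ds (right + 1) - P ds left →
    (∀ l' < left, M < P ds (right + 1) - P ds l') →
    let p := shrinkB M ds right left s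
    p.1 ≤ right + 1 ∧ p.2 = P ds (right + 1) - P ds p.1 ∧
    (∀ l' < p.1, M < P ds (right + 1) - P ds l') ∧
    (p.2 ≤ M ∨ p.1 = right + 1) := by
  intro left s
  induction left, s using shrinkB.induct M ds right with
  | case1 left s hcond ih =>
    intro hle hs hmin
    rw [shrinkB, if_pos hcond]
    obtain ⟨hgt, hlr⟩ := hcond
    apply ih
    · omega
    · rw [hs, P_succ ds left (by omega)]; ring
    · intro l' hl'
      rcases Nat.lt_or_ge l' left with h | h
      · exact hmin l' h
      · have : l' = left := by omega
        subst this; omega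
  | case2 left s hcond =>
    intro hle hs hmin
    rw [shrinkB, if_neg hcond]
    push_neg at hcond
    refine ⟨hle, hs, hmin, ?_⟩
    by_cases hM : s ≤ M
    · left; exact hM
    · right; have := hcond (by omega); omega

-- invariant carried through loopB: m elements processed, state (left, s, best)
def InvB (M : Int) (ds : List Int) (m left : Nat) (s best : Int) : Prop :=
  m ≤ ds.length ∧ left ≤ m ∧ s = P ds m - P ds left ∧
  (∀ l' < left, M < P ds m - P ds l') ∧
  (s ≤ M ∨ left = m) ∧
  IsAnsUpTo M ds m best
where
  IsAnsUpTo (M : Int) (ds : List Int) (m : Nat) (best : Int) : Prop :=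
    0 ≤ best ∧
    (best = 0 ∨ ∃ i j : Nat, i ≤ j ∧ j ≤ m ∧ P ds j - P ds i ≤ M ∧ best = (j : Int) - i) ∧
    (∀ i j : Nat, i ≤ j → j ≤ m → P ds j - P ds i ≤ M → (j : Int) - i ≤ best)

lemma loopB_inv (M : Int) (ds : List Int) :
    ∀ (t : List Int) (m left : Nat) (s best : Int),
      ds.drop m = t → InvB M ds m left s best →
      InvB.IsAnsUpTo M ds ds.length (loopB M ds m left s best t) := by
  intro t
  induction t with
  | nil =>
    intro m left s best hdrop hinv
    obtain ⟨hmlen, _, _, _, _, h0, ha, hu⟩ := hinv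
    have hm : ds.length ≤ m := List.drop_eq_nil_iff.mp hdrop
    simp only [loopB]
    refine ⟨h0, ?_, ?_⟩
    · rcases ha with h | ⟨i, j, h1, h2, h3, h4⟩
      · left; exact h
      · right; exact ⟨i, j, h1, by omega, h3, h4⟩
    · intro i j h1 h2 h3
      exact hu i j h1 (by omega) h3
  | cons d t ih =>
    intro m left s best hdrop hinv
    have hm : m < ds.length := by
      by_contra h
      push_neg at h
      rw [List.drop_eq_nil_of_le h] at hdrop
      simp at hdrop
    have h0 : ds[m]? = some d := by
      rw [← List.head?_drop, hdrop]
      rfl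
    have hd : ds.getD m 0 = d := by
      simp [List.getD_eq_getElem?_getD, h0]
    obtain ⟨hmlen, hle, hs, hmin, _, hbest⟩ := hinv
    simp only [loopB]
    have hws : s + |d| = P ds (m + 1) - P ds left := by
      rw [hs, P_succ ds m hm, hd]; ring
    have hmin' : ∀ l' < left, M < P ds (m + 1) - P ds l' := by
      intro l' hl'
      have h1 := hmin l' hl'
      have h2 : P ds m ≤ P ds (m+1) := P_mono ds (by omega)
      omega
    have hsp := shrinkB_spec M ds m hm left (s + |d|) (by omega) hws hmin'
    set p := shrinkB M ds m left (s + |d|) with hp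
    obtain ⟨hp1, hp2, hp3, hp4⟩ := hsp
    have ht : ds.drop (m + 1) = t := by
      rw [← List.tail_drop, hdrop]
      rfl
    apply ih (m + 1) p.1 p.2 _ ht
    refine ⟨by omega, hp1, hp2, hp3, hp4, ?_, ?_, ?_⟩
    · obtain ⟨hb0, _, _⟩ := hbest
      split <;> omega
    · obtain ⟨hb0, ha, _⟩ := hbest
      split
      · rename_i hgt
        right
        have hlt : p.1 < m + 1 := by
          rcases Nat.lt_or_ge p.1 (m+1) with h | h
          · exact h
          · have : p.1 = m + 1 := by omega
            rw [this] at hgt; push_cast at hgt; omega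
        have hvalid : P ds (m+1) - P ds p.1 ≤ M := by
          rcases hp4 with h | h
          · omega
          · omega
        exact ⟨p.1, m + 1, by omega, by omega, hvalid, by push_cast; ring⟩
      · rcases ha with h | ⟨i, j, h1, h2, h3, h4⟩
        · left; exact h
        · right; exact ⟨i, j, h1, by omega, h3, h4⟩
    · obtain ⟨hb0, _, hu⟩ := hbest
      intro i j h1 h2 h3
      rcases Nat.lt_or_ge j (m+1) with hj | hj
      · have := hu i j h1 (by omega) h3
        split <;> omega
      · have hj' : j = m + 1 := by omega
        subst hj'
        have hi : p.1 ≤ i := by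
          by_contra hcon
          push_neg at hcon
          have := hp3 i hcon
          omega
        have hcast : (p.1 : Int) ≤ (i : Int) := by exact_mod_cast hi
        split <;> push_cast <;> omega

lemma B_isAns (M : Int) (ds : List Int) :
    InvB.IsAnsUpTo M ds ds.length (solve_mirana_challenge_alt M ds) := by
  unfold solve_mirana_challenge_alt
  apply loopB_inv M ds ds 0 0 0 0 (by simp)
  refine ⟨by omega, by omega, by simp [P_zero], by omega, Or.inr rfl, by omega, Or.inl rfl, ?_⟩
  intro i j h1 h2 _
  omega

lemma B_isAns' (M : Int) (ds : List Int) : IsAns M ds (solve_mirana_challenge_alt M ds) := by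
  obtain ⟨h0, ha, hu⟩ := B_isAns M ds
  exact ⟨h0, ha, hu⟩

-- ===== VERDICT (by name: the statement is the Claim_ definition above) =====
theorem solve_mirana_challenge_spec : Claim_equal_solve_mirana_challenge := by
  intro M ds _
  unfold Spec_solve_mirana_challenge
  exact isAns_unique M ds _ _ (A_isAns M ds) (B_isAns' M ds)
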